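-- pv_equiv track=rewrite | github.com/yongrenjie/genesis | old/initial_python/gen_argv.py | prettify_gradients
-- ===== SOURCE A (Python) =====
-- def split_prm(prm):
--     prml = prm.rstrip("1234567890")   # "cnst"
--     if prml == prm:                   # "td"
--         return (prml, 0)
--     else:
--         prmr = int(prm[len(prml):])   # 2
--         return (prml, prmr)
--
-- def prettify_gradients(gradient_strengths):
--     """
--     Arranges gradients and adds gpnam = SMSQ10.100 to all of them.
--     """
--     gpzlines = gradient_strengths.split("\n")
--     # Sort the gpzX lines in ascending order.
--     def sort_gradients(line):
--         prm_name = line.split(":")[0].lstrip(';').strip()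
--         return split_prm(prm_name)
--     gpzlines.sort(key=sort_gradients)
--     # Add gpnam lines.
--     gpnamlines = []
--     for _, n in (sort_gradients(l) for l in gpzlines):
--         gpnamlines.append(f";gpnam{n}: SMSQ10.100")
--     gplines = gpzlines + gpnamlines
--     return "\n".join(gplines)
-- ===== SOURCE B (Python) =====
-- def split_prm(prm):
--     prml = prm.rstrip("1234567890")
--     if prml == prm:
--         return (prml, 0)
--     else:
--         return (prml, int(prm[len(prml):]))
--
-- def prettify_gradients(gradient_strengths):
--     """
--     Arranges gradients and adds gpnam = SMSQ10.100 to all of them.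
--     Group-then-sort-keys: bucket the lines into a dict keyed by their parsed
--     (name, number) key (buckets keep the original order, which gives the stable
--     tie ordering for free), sort only the DISTINCT keys, then emit each bucket
--     and its repeated gpnam line in one pass over the sorted keys.
--     """
--     lines = gradient_strengths.split("\n")
--     groups = {}
--     for line in lines:
--         key = split_prm(line.split(":")[0].lstrip(';').strip())
--         groups.setdefault(key, []).append(line)
--     sorted_lines = []
--     gpnamlines = []
--     for key in sorted(groups):
--         bucket = groups[key]
--         sorted_lines += bucket
--         gpnamlines += [f";gpnam{key[1]}: SMSQ10.100"] * len(bucket)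
--     return "\n".join(sorted_lines + gpnamlines)
-- ===== Notes on version B (the rewrite author's own statement) =====
-- stated objective: alternative
-- what changed: Replaces A's comparison sort of all lines by a parsed key (re-parsing every sorted line afterwards) with a group-by algorithm: lines are bucketed into a dict keyed by their parsed key, only the distinct keys are sorted, and one pass over the sorted keys emits each bucket and its repeated gpnam line.
import Mathlib
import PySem

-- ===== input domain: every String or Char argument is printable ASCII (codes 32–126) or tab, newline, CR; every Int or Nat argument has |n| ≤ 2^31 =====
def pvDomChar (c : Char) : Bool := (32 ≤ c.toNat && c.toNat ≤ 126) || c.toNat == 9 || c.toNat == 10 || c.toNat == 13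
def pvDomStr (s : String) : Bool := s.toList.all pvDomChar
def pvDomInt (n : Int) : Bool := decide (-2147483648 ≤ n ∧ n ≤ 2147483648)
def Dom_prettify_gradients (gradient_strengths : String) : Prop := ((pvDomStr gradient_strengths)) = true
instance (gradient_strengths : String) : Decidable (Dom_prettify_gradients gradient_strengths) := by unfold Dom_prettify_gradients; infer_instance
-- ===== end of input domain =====

-- B replaces A's "sort all lines by a parsed key, then re-parse every sorted line" with a
-- group-by-key dictionary: lines are bucketed once, only the DISTINCT keys are sorted, and one
-- pass over the sorted keys emits each bucket and its repeated gpnam line (alternative algorithm).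


-- ===== PORT A =====
-- hand port of str.rstrip("1234567890"): drop trailing characters from that set (exact: the set is ten ASCII digits)
def pvRstripDigits (cs : List Char) : List Char :=
  (cs.reverse.dropWhile (fun c => decide (c ∈ ['1','2','3','4','5','6','7','8','9','0']))).reverse

def split_prm (prm : List Char) : List Char × Int :=
  let prml := pvRstripDigits prm
  if prml = prm then (prml, 0)
  else
    -- prm[len(prml):] is a nonempty all-digit string here, so int() cannot raise; getD 0 is unreachable
    (prml, (PySem.Int.ofChars? (List.drop prml.length prm)).getD 0)

-- line.split(":")[0].lstrip(';').strip(); lstrip(';') ported by hand as dropWhile (exact: single ASCII char set)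
def pvSortKey (line : List Char) : List Char × Int :=
  split_prm (PySem.Chars.strip (List.dropWhile (fun c => c == ';') ((PySem.Chars.splitOn line [':']).headD [])))

-- f";gpnam{n}: SMSQ10.100"
def pvGpnamLine (n : Int) : List Char :=
  ";gpnam".toList ++ PySem.Int.toChars n ++ ": SMSQ10.100".toList

def prettify_gradients (gradient_strengths : String) : String :=
  let gpzlines := PySem.Chars.splitOn gradient_strengths.toList ['\n']
  let sortedLines := PySem.List.sorted2 gpzlines (fun l => (pvSortKey l).1) (fun l => (pvSortKey l).2)
  let gpnamlines := sortedLines.foldl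
    (fun (acc : List (List Char)) l => acc ++ [pvGpnamLine (pvSortKey l).2]) []
  String.mk (PySem.Chars.join ['\n'] (sortedLines ++ gpnamlines))

-- ===== PORT B =====
def prettify_gradients_alt (gradient_strengths : String) : String :=
  let lines := PySem.Chars.splitOn gradient_strengths.toList ['\n']
  -- groups.setdefault(key, []).append(line): same dict as groups[key] = groups.get(key, []) + [line] = Dict.modify
  let groups : PySem.Dict (List Char × Int) (List (List Char)) :=
    lines.foldl (fun d line => d.modify (pvSortKey line) [] (· ++ [line])) PySem.Dict.empty
  -- for key in sorted(groups): two accumulators; bucket = groups[key] (key is present, so getD's default is unreachable)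
  let acc := (PySem.List.sorted2 groups.keys Prod.fst Prod.snd).foldl
    (fun (acc : List (List Char) × List (List Char)) kk =>
      (acc.1 ++ groups.getD kk [],
       acc.2 ++ PySem.List.pyRepeat [pvGpnamLine kk.2] ((groups.getD kk []).length : Int)))
    ([], [])
  String.mk (PySem.Chars.join ['\n'] (acc.1 ++ acc.2))

-- ===== PRECONDITION & SPEC =====
def Spec_prettify_gradients (gradient_strengths : String) (out : String) : Prop := out = prettify_gradients_alt gradient_strengths
instance (gradient_strengths : String) (out : String) : Decidable (Spec_prettify_gradients gradient_strengths out) := by unfold Spec_prettify_gradients; infer_instance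

-- ===== CLAIM (what is proved, stated in full; the proofs are below) =====
def Claim_equal_prettify_gradients : Prop := ∀ (gradient_strengths : String), Dom_prettify_gradients gradient_strengths → Spec_prettify_gradients gradient_strengths (prettify_gradients gradient_strengths)

-- ===== LEMMAS AND PROOFS =====

-- the boolean comparator PySem.List.sorted2 uses, specialised to the (name, number) key
def cmpK (a b : List Char × Int) : Bool :=
  decide (a.1 < b.1) || (!decide (b.1 < a.1) && decide (a.2 < b.2))

-- the comparator sorted2 uses on lines is cmpK on their keys
def cmpL (a b : List Char) : Bool := cmpK (pvSortKey a) (pvSortKey b)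

theorem cmpK_iff (a b : List Char × Int) :
    cmpK a b = true ↔ a.1 < b.1 ∨ (a.1 = b.1 ∧ a.2 < b.2) := by
  unfold cmpK
  rcases lt_trichotomy a.1 b.1 with h | h | h
  · simp [h]
  · simp [h]
  · simp [h, lt_asymm h, ne_of_gt h]

theorem cmpK_irrefl (a : List Char × Int) : cmpK a a = false := by
  rw [Bool.eq_false_iff]
  intro h
  rcases (cmpK_iff a a).mp h with h' | ⟨_, h'⟩ <;> exact lt_irrefl _ h'

theorem cmpK_asymm {a b : List Char × Int} (h : cmpK a b = true) : cmpK b a = false := by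
  rw [Bool.eq_false_iff]
  intro h2
  rcases (cmpK_iff a b).mp h with h1 | ⟨he1, h1⟩ <;>
    rcases (cmpK_iff b a).mp h2 with h2' | ⟨he2, h2'⟩
  · exact lt_asymm h1 h2'
  · exact absurd h1 (he2 ▸ lt_irrefl _)
  · exact absurd h2' (he1 ▸ lt_irrefl _)
  · exact lt_asymm h1 h2'

theorem cmpK_trans {a b c : List Char × Int} (h1 : cmpK a b = true) (h2 : cmpK b c = true) :
    cmpK a c = true := by
  rw [cmpK_iff] at h1 h2 ⊢
  rcases h1 with h1 | ⟨e1, h1⟩ <;> rcases h2 with h2 | ⟨e2, h2⟩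
  · exact Or.inl (lt_trans h1 h2)
  · exact Or.inl (e2 ▸ h1)
  · exact Or.inl (e1 ▸ h2)
  · exact Or.inr ⟨e1.trans e2, lt_trans h1 h2⟩

theorem cmpK_total {a b : List Char × Int} (h : a ≠ b) :
    cmpK a b = true ∨ cmpK b a = true := by
  rcases lt_trichotomy a.1 b.1 with h1 | h1 | h1
  · exact Or.inl ((cmpK_iff a b).mpr (Or.inl h1))
  · rcases lt_trichotomy a.2 b.2 with h2 | h2 | h2
    · exact Or.inl ((cmpK_iff a b).mpr (Or.inr ⟨h1, h2⟩))
    · exact absurd (Prod.ext h1 h2) h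
    · exact Or.inr ((cmpK_iff b a).mpr (Or.inr ⟨h1.symm, h2⟩))
  · exact Or.inr ((cmpK_iff b a).mpr (Or.inl h1))

-- definitional equations of PySem.List.insertBy
theorem insertBy_nil {α : Type} (before : α → α → Bool) (x : α) :
    PySem.List.insertBy before x [] = [x] := rfl

theorem insertBy_cons {α : Type} (before : α → α → Bool) (x y : α) (ys : List α) :
    PySem.List.insertBy before x (y :: ys) =
      if before x y then x :: y :: ys else y :: PySem.List.insertBy before x ys := rfl

-- insertion skips a prefix none of whose elements x goes before
theorem insertBy_append_left {α : Type} (before : α → α → Bool) (x : α) (p s : List α)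
    (h : ∀ a ∈ p, before x a = false) :
    PySem.List.insertBy before x (p ++ s) = p ++ PySem.List.insertBy before x s := by
  induction p with
  | nil => rfl
  | cons a p ih =>
    rw [List.cons_append, insertBy_cons, h a (List.mem_cons_self), List.cons_append]
    simp only [Bool.false_eq_true, if_false]
    rw [ih (fun b hb => h b (List.mem_cons_of_mem a hb))]

-- insertion lands at the front when x goes before every element
theorem insertBy_front {α : Type} (before : α → α → Bool) (x : α) (s : List α)
    (h : ∀ a ∈ s, before x a = true) :
    PySem.List.insertBy before x s = x :: s := by
  cases s with
  | nil => rfl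
  | cons a s => rw [insertBy_cons, h a (List.mem_cons_self), if_pos rfl]

-- insertBy preserves the "never strictly later" pairwise invariant
theorem insertBy_pairwise {α : Type} (lt : α → α → Bool)
    (hA : ∀ a b, lt a b = true → lt b a = false)
    (hT : ∀ a b c, lt a b = true → lt b c = true → lt a c = true)
    (x : α) (l : List α) (hl : l.Pairwise (fun a b => lt b a = false)) :
    (PySem.List.insertBy lt x l).Pairwise (fun a b => lt b a = false) := by
  induction l with
  | nil => simp [insertBy_nil]
  | cons y ys ih =>
    rcases List.pairwise_cons.mp hl with ⟨hy, hys⟩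
    rw [insertBy_cons]
    by_cases hxy : lt x y = true
    · rw [if_pos hxy]
      refine List.pairwise_cons.mpr ⟨?_, hl⟩
      intro a ha
      rcases List.mem_cons.mp ha with rfl | ha
      · exact hA _ _ hxy
      · rw [Bool.eq_false_iff]; intro hax
        exact absurd (hT a x y hax hxy) (Bool.eq_false_iff.mp (hy a ha))
    · rw [if_neg hxy]
      refine List.pairwise_cons.mpr ⟨?_, ih hys⟩
      intro a ha
      rcases (PySem.List.mem_insertBy lt x a ys).mp ha with rfl | ha
      · exact Bool.eq_false_iff.mpr hxy
      · exact hy a ha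

theorem foldl_insertBy_pairwise {α : Type} (lt : α → α → Bool)
    (hA : ∀ a b, lt a b = true → lt b a = false)
    (hT : ∀ a b c, lt a b = true → lt b c = true → lt a c = true)
    (xs : List α) :
    (xs.foldl (fun acc x => PySem.List.insertBy lt x acc) []).Pairwise
      (fun a b => lt b a = false) := by
  suffices h : ∀ (acc : List α), acc.Pairwise (fun a b => lt b a = false) →
      (xs.foldl (fun acc x => PySem.List.insertBy lt x acc) acc).Pairwise
        (fun a b => lt b a = false) from h [] (by simp)
  induction xs with
  | nil => intro acc hacc; exact hacc
  | cons x xs ih =>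
    intro acc hacc
    exact ih _ (insertBy_pairwise lt hA hT x acc hacc)

-- sorted2 is literally the left fold of insertBy with these comparators
theorem sorted2_lines_foldl (xs : List (List Char)) :
    PySem.List.sorted2 xs (fun l => (pvSortKey l).1) (fun l => (pvSortKey l).2)
      = xs.foldl (fun acc x => PySem.List.insertBy cmpL x acc) [] := rfl

theorem sorted2_keys_foldl (xs : List (List Char × Int)) :
    PySem.List.sorted2 xs Prod.fst Prod.snd
      = xs.foldl (fun acc x => PySem.List.insertBy cmpK x acc) [] := rfl

theorem sorted2_lines_append (xs : List (List Char)) (x : List Char) :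
    PySem.List.sorted2 (xs ++ [x]) (fun l => (pvSortKey l).1) (fun l => (pvSortKey l).2)
      = PySem.List.insertBy cmpL x
          (PySem.List.sorted2 xs (fun l => (pvSortKey l).1) (fun l => (pvSortKey l).2)) := by
  rw [sorted2_lines_foldl, sorted2_lines_foldl, List.foldl_append, List.foldl_cons, List.foldl_nil]

theorem sorted2_keys_append (xs : List (List Char × Int)) (x : List Char × Int) :
    PySem.List.sorted2 (xs ++ [x]) Prod.fst Prod.snd
      = PySem.List.insertBy cmpK x (PySem.List.sorted2 xs Prod.fst Prod.snd) := by
  rw [sorted2_keys_foldl, sorted2_keys_foldl, List.foldl_append, List.foldl_cons, List.foldl_nil]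

-- CORE: inserting a line into a key-grouped concatenation appends it to its key's bucket
-- (creating the bucket, at the sorted position of its key, when the key is new)
-- flatMap only looks at its function on members of the list
theorem pv_flatMap_congr {α β : Type} {l : List α} {f g : α → List β}
    (h : ∀ a ∈ l, f a = g a) : l.flatMap f = l.flatMap g := by
  induction l with
  | nil => rfl
  | cons a l ih =>
    rw [List.flatMap_cons, List.flatMap_cons, h a List.mem_cons_self,
      ih (fun b hb => h b (List.mem_cons_of_mem a hb))]

theorem insertBy_flatMap_group (x : List Char) (K : List (List Char × Int))
    (g : List Char × Int → List (List Char))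
    (hsort : K.Pairwise (fun a b => cmpK a b = true))
    (hg : ∀ kk ∈ K, ∀ l ∈ g kk, pvSortKey l = kk)
    (hempty : pvSortKey x ∉ K → g (pvSortKey x) = []) :
    PySem.List.insertBy cmpL x (K.flatMap g)
      = (if pvSortKey x ∈ K then K else PySem.List.insertBy cmpK (pvSortKey x) K).flatMap
          (fun kk => if kk = pvSortKey x then g kk ++ [x] else g kk) := by
  induction K with
  | nil =>
    have hgx : g (pvSortKey x) = [] := hempty (List.not_mem_nil)
    simp [insertBy_nil, hgx]
  | cons kk rest ih =>
    rcases List.pairwise_cons.mp hsort with ⟨hkk, hrest⟩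
    by_cases hx : cmpK (pvSortKey x) kk = true
    · -- x's key sorts strictly before kk, so it is new: x opens a fresh head bucket
      have hne : kk ≠ pvSortKey x := by
        rintro rfl; rw [cmpK_irrefl] at hx; exact Bool.false_ne_true hx
      have hnr : pvSortKey x ∉ rest := by
        intro hm
        have h2 := cmpK_asymm (hkk _ hm)
        rw [hx] at h2; exact absurd h2 (by decide)
      have hnotin : pvSortKey x ∉ kk :: rest := by
        simp only [List.mem_cons, not_or]
        exact ⟨fun h => hne h.symm, hnr⟩
      have hall : ∀ a ∈ (kk :: rest).flatMap g, cmpL x a = true := by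
        intro a ha
        rcases List.mem_flatMap.mp ha with ⟨kk', hk', ha'⟩
        have hkey := hg kk' hk' a ha'
        have hcmp : cmpK (pvSortKey x) kk' = true := by
          rcases List.mem_cons.mp hk' with rfl | hm
          · exact hx
          · exact cmpK_trans hx (hkk _ hm)
        simpa [cmpL, hkey] using hcmp
      rw [insertBy_front _ _ _ hall, if_neg hnotin, insertBy_cons, if_pos hx]
      have hrq : rest.flatMap (fun kk' => if kk' = pvSortKey x then g kk' ++ [x] else g kk')
          = rest.flatMap g := by
        apply pv_flatMap_congr
        intro kk' hm
        exact if_neg (by rintro rfl; exact hnr hm)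
      simp [List.flatMap_cons, hempty hnotin, if_neg hne, hrq]
    · have hx' : cmpK (pvSortKey x) kk = false := by simpa using hx
      have h1 : ∀ a ∈ g kk, cmpL x a = false := by
        intro a ha
        have hkey := hg kk List.mem_cons_self a ha
        simpa [cmpL, hkey] using hx'
      rw [List.flatMap_cons, insertBy_append_left _ _ _ _ h1]
      by_cases heq : kk = pvSortKey x
      · -- x's key is the head key: x goes to the end of the head bucket
        have hallrest : ∀ a ∈ rest.flatMap g, cmpL x a = true := by
          intro a ha
          rcases List.mem_flatMap.mp ha with ⟨kk', hm, ha'⟩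
          have hkey := hg kk' (List.mem_cons_of_mem _ hm) a ha'
          have h2 := hkk _ hm
          rw [heq] at h2
          simpa [cmpL, hkey] using h2
        rw [insertBy_front _ _ _ hallrest]
        have hmem : pvSortKey x ∈ kk :: rest := heq ▸ List.mem_cons_self
        have hrq : rest.flatMap (fun kk' => if kk' = pvSortKey x then g kk' ++ [x] else g kk')
            = rest.flatMap g := by
          apply pv_flatMap_congr
          intro kk' hm
          refine if_neg ?_
          rintro rfl
          have h2 := hkk _ hm
          rw [heq] at h2
          rw [cmpK_irrefl] at h2
          exact Bool.false_ne_true h2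
        rw [if_pos hmem]
        simp [List.flatMap_cons, if_pos heq, hrq]
      · -- x's key sorts after kk: peel the head bucket off and recurse
        have hempty' : pvSortKey x ∉ rest → g (pvSortKey x) = [] := by
          intro h
          refine hempty ?_
          simp only [List.mem_cons, not_or]
          exact ⟨fun hh => heq hh.symm, h⟩
        rw [ih hrest (fun kk' h' l hl => hg kk' (List.mem_cons_of_mem _ h') l hl) hempty']
        by_cases hm : pvSortKey x ∈ rest
        · rw [if_pos hm, if_pos (List.mem_cons_of_mem _ hm)]
          simp only [List.flatMap_cons, if_neg heq]
        · have hnotin : pvSortKey x ∉ kk :: rest := by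
            simp only [List.mem_cons, not_or]
            exact ⟨fun hh => heq hh.symm, hm⟩
          rw [if_neg hm, if_neg hnotin, insertBy_cons, if_neg hx]
          simp only [List.flatMap_cons, if_neg heq]

-- the sorted distinct-key list is strictly increasing under cmpK
theorem KS_pairwise (ks : List (List Char × Int)) (hnd : ks.Nodup) :
    (PySem.List.sorted2 ks Prod.fst Prod.snd).Pairwise (fun a b => cmpK a b = true) := by
  have h1 := foldl_insertBy_pairwise cmpK (fun a b h => cmpK_asymm h)
    (fun a b c ha hb => cmpK_trans ha hb) ks
  rw [← sorted2_keys_foldl] at h1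
  have h2 : (PySem.List.sorted2 ks Prod.fst Prod.snd).Nodup :=
    ((PySem.List.sorted2_perm ks Prod.fst Prod.snd false).nodup_iff).mpr hnd
  refine List.Pairwise.imp ?_ (h2.and h1)
  intro a b hab
  obtain ⟨hne, hba⟩ := hab
  rcases cmpK_total hne with h | h
  · exact h
  · rw [hba] at h; exact absurd h (Bool.false_ne_true)

-- stable sort by key = concatenation of the original-order buckets over the sorted distinct keys
theorem sorted2_eq_flatMap_groups (xs : List (List Char)) :
    PySem.List.sorted2 xs (fun l => (pvSortKey l).1) (fun l => (pvSortKey l).2)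
      = (PySem.List.sorted2 (PySem.Set.ofList (xs.map pvSortKey)) Prod.fst Prod.snd).flatMap
          (fun kk => xs.filter (fun l => pvSortKey l == kk)) := by
  induction xs using List.reverseRecOn with
  | nil => rfl
  | append_singleton xs x ih =>
    have hmemiff : pvSortKey x ∈ PySem.List.sorted2 (PySem.Set.ofList (xs.map pvSortKey))
        Prod.fst Prod.snd ↔ pvSortKey x ∈ xs.map pvSortKey := by
      rw [List.Perm.mem_iff (PySem.List.sorted2_perm _ _ _ _), PySem.Set.mem_ofList]
    have hhg : ∀ kk ∈ PySem.List.sorted2 (PySem.Set.ofList (xs.map pvSortKey)) Prod.fst Prod.snd,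
        ∀ l ∈ xs.filter (fun l => pvSortKey l == kk), pvSortKey l = kk := by
      intro kk _ l hl
      have := (List.mem_filter.mp hl).2
      simpa using this
    have hempty : pvSortKey x ∉ PySem.List.sorted2 (PySem.Set.ofList (xs.map pvSortKey))
        Prod.fst Prod.snd → xs.filter (fun l => pvSortKey l == pvSortKey x) = [] := by
      intro h
      rw [List.filter_eq_nil_iff]
      intro l hl hp
      exact h (hmemiff.mpr (List.mem_map.mpr ⟨l, hl, by simpa using hp⟩))
    rw [sorted2_lines_append, ih, insertBy_flatMap_group x _ _
        (KS_pairwise _ (PySem.Set.nodup_ofList _)) hhg hempty]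
    have hG : (fun kk => (xs ++ [x]).filter (fun l => pvSortKey l == kk))
        = (fun kk => if kk = pvSortKey x
            then xs.filter (fun l => pvSortKey l == kk) ++ [x]
            else xs.filter (fun l => pvSortKey l == kk)) := by
      funext kk
      rw [List.filter_append]
      by_cases h : kk = pvSortKey x
      · subst h; simp
      · have hbf : (pvSortKey x == kk) = false := by
          simp only [beq_eq_false_iff_ne]
          exact fun hh => h hh.symm
        simp [hbf, h]
    simp only [hG, List.map_append, List.map_cons, List.map_nil,
      PySem.Set.ofList_append_singleton]
    by_cases hmm : pvSortKey x ∈ xs.map pvSortKey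
    · rw [PySem.Set.add_of_mem ((PySem.Set.mem_ofList _ _).mpr hmm), if_pos (hmemiff.mpr hmm)]
    · rw [PySem.Set.add_of_not_mem (fun hc => hmm ((PySem.Set.mem_ofList _ _).mp hc)),
        sorted2_keys_append, if_neg (fun hc => hmm (hmemiff.mp hc))]

theorem prettify_gradients_eq (s : String) : prettify_gradients s = prettify_gradients_alt s := by
  unfold prettify_gradients prettify_gradients_alt
  simp only []
  have hkeys : (((PySem.Chars.splitOn s.toList ['\n']).foldl
        (fun d line => d.modify (pvSortKey line) [] (· ++ [line])) PySem.Dict.empty).keys : List (List Char × Int))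
      = PySem.Set.ofList ((PySem.Chars.splitOn s.toList ['\n']).map pvSortKey) := by
    rw [PySem.Dict.keys_foldl_modify_key _ pvSortKey [] (fun _ line g => g ++ [line])]
    rw [PySem.Dict.keys_empty, PySem.Set.update_nil_left]
  have hgetD : ∀ kk, (((PySem.Chars.splitOn s.toList ['\n']).foldl
        (fun d line => d.modify (pvSortKey line) [] (· ++ [line])) PySem.Dict.empty).getD kk [])
      = (PySem.Chars.splitOn s.toList ['\n']).filter (fun l => pvSortKey l == kk) := by
    intro kk
    have h := PySem.Dict.getD_foldl_modify_append
      ((PySem.Chars.splitOn s.toList ['\n']).map (fun l => (pvSortKey l, l)))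
      PySem.Dict.empty kk
    simp only [List.foldl_map, List.filter_map, List.map_map, Function.comp_def,
      PySem.Dict.getD_empty, List.nil_append, List.map_id'] at h
    exact h
  rw [PySem.List.foldl_append_singleton_eq_map, List.nil_append]
  simp only [hkeys, hgetD]
  rw [PySem.List.foldl_prod_mk
      (f := fun (acc : List (List Char)) kk =>
        acc ++ (PySem.Chars.splitOn s.toList ['\n']).filter (fun l => pvSortKey l == kk))
      (g := fun (acc : List (List Char)) kk =>
        acc ++ PySem.List.pyRepeat [pvGpnamLine kk.2]
          ((((PySem.Chars.splitOn s.toList ['\n']).filter (fun l => pvSortKey l == kk)).length : Int)))]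
  rw [PySem.List.foldl_append_eq_flatMap, PySem.List.foldl_append_eq_flatMap, List.nil_append,
    List.nil_append]
  have hlines := sorted2_eq_flatMap_groups (PySem.Chars.splitOn s.toList ['\n'])
  have hnames : (PySem.List.sorted2 (PySem.Chars.splitOn s.toList ['\n'])
        (fun l => (pvSortKey l).1) (fun l => (pvSortKey l).2)).map
          (fun l => pvGpnamLine (pvSortKey l).2)
      = (PySem.List.sorted2 (PySem.Set.ofList ((PySem.Chars.splitOn s.toList ['\n']).map pvSortKey))
          Prod.fst Prod.snd).flatMap
          (fun kk => PySem.List.pyRepeat [pvGpnamLine kk.2]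
            ((((PySem.Chars.splitOn s.toList ['\n']).filter (fun l => pvSortKey l == kk)).length : Int))) := by
    rw [hlines, List.map_flatMap]
    apply pv_flatMap_congr
    intro kk _
    have hconst : ((PySem.Chars.splitOn s.toList ['\n']).filter (fun l => pvSortKey l == kk)).map
        (fun l => pvGpnamLine (pvSortKey l).2)
        = ((PySem.Chars.splitOn s.toList ['\n']).filter (fun l => pvSortKey l == kk)).map
          (fun _ => pvGpnamLine kk.2) := by
      apply List.map_congr_left
      intro l hl
      have : pvSortKey l = kk := by simpa using (List.mem_filter.mp hl).2
      rw [this]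
    rw [hconst, PySem.List.pyRepeat_singleton]
    simp [List.map_const']
  rw [hnames, hlines]

-- ===== VERDICT (by name: the statement is the Claim_ definition above) =====
theorem prettify_gradients_spec : Claim_equal_prettify_gradients := by
  intro s _
  unfold Spec_prettify_gradients
  exact prettify_gradients_eq s
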